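-- pv_equiv track=rewrite | github.com/gyasis/SIO | src/sio/mining/flow_extractor.py | compressed_to_tool_indices
-- ===== SOURCE A (Python) =====
-- def compressed_to_tool_indices(sequence: list[dict]) -> list[list[int]]:
--     """Map each position in the RLE-compressed sequence back to tool_sequence indices.
--
--     Given the raw tool sequence (list of dicts with 'tool' and 'ext'),
--     returns a list where element ``i`` is the list of tool_sequence indices
--     that were collapsed into compressed position ``i``.
--
--     This mirrors the logic of :func:`compress_rle` exactly.
--     """
--     if not sequence:
--         return []
--
--     mapping: list[list[int]] = []
--     prev_key = None
--     current_indices: list[int] = []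
--
--     for idx, item in enumerate(sequence):
--         key = f"{item['tool']}{item['ext']}"
--         if key == prev_key:
--             current_indices.append(idx)
--         else:
--             if prev_key is not None:
--                 mapping.append(current_indices)
--             prev_key = key
--             current_indices = [idx]
--
--     # Flush last group
--     if current_indices:
--         mapping.append(current_indices)
--
--     return mapping
-- ===== SOURCE B (Python) =====
-- def compressed_to_tool_indices(sequence: list[dict]) -> list[list[int]]:
--     """Map each position in the RLE-compressed sequence back to tool_sequence indices."""
--     keys = [f"{item['tool']}{item['ext']}" for item in sequence]
--     starts = [i for i in range(len(keys)) if i == 0 or keys[i] != keys[i - 1]]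
--     ends = starts[1:] + [len(keys)]
--     return [list(range(s, e)) for s, e in zip(starts, ends)]
-- ===== Notes on version B (the rewrite author's own statement) =====
-- stated objective: alternative
-- what changed: Instead of A's single-pass prev_key/current_indices state machine with a final flush, B runs three staged passes: build the key list, collect the change-point indices (i == 0 or keys[i] != keys[i-1]), then emit each group as list(range(start, next_start)) -- valid because each collapsed group is a run of consecutive indices.
import Mathlib
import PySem

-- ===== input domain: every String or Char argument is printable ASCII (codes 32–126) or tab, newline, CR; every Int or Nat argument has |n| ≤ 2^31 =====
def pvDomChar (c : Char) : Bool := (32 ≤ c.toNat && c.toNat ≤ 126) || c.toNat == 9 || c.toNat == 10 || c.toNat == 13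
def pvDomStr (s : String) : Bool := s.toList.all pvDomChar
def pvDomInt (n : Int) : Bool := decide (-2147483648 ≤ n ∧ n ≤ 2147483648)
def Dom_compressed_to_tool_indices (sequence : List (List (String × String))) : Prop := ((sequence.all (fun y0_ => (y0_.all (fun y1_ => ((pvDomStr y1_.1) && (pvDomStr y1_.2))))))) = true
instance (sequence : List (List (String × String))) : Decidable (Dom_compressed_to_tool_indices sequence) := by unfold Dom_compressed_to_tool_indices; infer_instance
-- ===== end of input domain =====

-- B replaces A's single-pass prev_key/current_indices state machine by three staged passes:
-- key list, change-point indices, then one contiguous range per group. Return value only.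

-- key = f"{item['tool']}{item['ext']}" (dict lookup = first match in the association list;
-- total here because Pre_ guarantees both keys are present)
def pvKey (item : List (String × String)) : String :=
  (((item.find? (fun p => p.1 == "tool")).map Prod.snd).getD "") ++
  (((item.find? (fun p => p.1 == "ext")).map Prod.snd).getD "")

-- ===== PORT A =====
-- one step of A's for-loop; state = (mapping, prev_key, current_indices)
def pvStepA (s : List (List Int) × Option String × List Int)
    (p : Int × List (String × String)) : List (List Int) × Option String × List Int :=
  let key := pvKey p.2
  if some key = s.2.1 then
    (s.1, s.2.1, s.2.2 ++ [p.1])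
  else if s.2.1 ≠ none then
    (s.1 ++ [s.2.2], some key, [p.1])
  else
    (s.1, some key, [p.1])

def compressed_to_tool_indices (sequence : List (List (String × String))) : List (List Int) :=
  if sequence = [] then []
  else
    let st := (PySem.List.enumerate sequence).foldl pvStepA ([], none, [])
    if st.2.2 ≠ [] then st.1 ++ [st.2.2] else st.1

-- ===== PORT B =====
-- keys = [key(item) for item in sequence]; starts = change points; groups = ranges
def compressed_to_tool_indices_alt (sequence : List (List (String × String))) : List (List Int) :=
  let keys := sequence.map pvKey
  let n : Int := (keys.length : Int)
  let starts := (PySem.List.pyRange 0 n 1).filter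
      (fun i => i == 0 || !(PySem.List.pyGet? keys i == PySem.List.pyGet? keys (i - 1)))
  let ends := starts.drop 1 ++ [n]
  (starts.zip ends).map (fun p => PySem.List.pyRange p.1 p.2 1)

-- ===== PRECONDITION & SPEC =====
-- Pre_ excludes exactly the inputs where A raises KeyError: some item lacks a 'tool' or 'ext' key.
def Pre_compressed_to_tool_indices (sequence : List (List (String × String))) : Prop :=
  ∀ item ∈ sequence, "tool" ∈ item.map Prod.fst ∧ "ext" ∈ item.map Prod.fst
instance (sequence : List (List (String × String))) : Decidable (Pre_compressed_to_tool_indices sequence) := by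
  unfold Pre_compressed_to_tool_indices; infer_instance

def pvWitness_compressed_to_tool_indices : (List (List (String × String))) :=
  [[("tool", "a"), ("ext", "py")], [("tool", "a"), ("ext", "py")], [("tool", "b"), ("ext", "")]]

def Spec_compressed_to_tool_indices (sequence : List (List (String × String))) (out : List (List Int)) : Prop := out = compressed_to_tool_indices_alt sequence
instance (sequence : List (List (String × String))) (out : List (List Int)) : Decidable (Spec_compressed_to_tool_indices sequence out) := by unfold Spec_compressed_to_tool_indices; infer_instance

-- ===== CLAIM (what is proved, stated in full; the proofs are below) =====
def Claim_equal_compressed_to_tool_indices : Prop := ∀ (sequence : List (List (String × String))), Dom_compressed_to_tool_indices sequence → Pre_compressed_to_tool_indices sequence → Spec_compressed_to_tool_indices sequence (compressed_to_tool_indices sequence)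

-- ===== LEMMAS AND PROOFS =====

-- canonical run decomposition of the key list: one contiguous range per maximal run
def pvCanon (off : Int) : List String → List (List Int)
  | [] => []
  | k :: t =>
      PySem.List.pyRange off (off + 1 + (t.takeWhile (· == k)).length) 1 ::
      pvCanon (off + 1 + (t.takeWhile (· == k)).length) (t.dropWhile (· == k))
  termination_by l => l.length
  decreasing_by simpa using Nat.lt_succ_of_le (List.length_dropWhile_le _ _)

-- A's flush step, applied to the loop's final state
def pvFlush (s : List (List Int) × Option String × List Int) : List (List Int) :=
  if s.2.2 ≠ [] then s.1 ++ [s.2.2] else s.1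

-- shifting a range shifts its elements
theorem pvRange_shift (a b c : Int) :
    PySem.List.pyRange (a + c) (b + c) 1 = (PySem.List.pyRange a b 1).map (· + c) := by
  rw [PySem.List.pyRange_one, PySem.List.pyRange_one, List.map_map]
  have h : b + c - (a + c) = b - a := by ring
  rw [h]
  refine List.map_congr_left ?_
  intro x _
  simp [Function.comp]
  ring

-- A-side invariant: open group (prev = some k, cur ≠ []) consuming enumerate seq j
theorem pvFoldA_canon (seq : List (List (String × String))) :
    ∀ (j : Int) (m : List (List Int)) (k : String) (cur : List Int), cur ≠ [] →
    pvFlush ((PySem.List.enumerate seq j).foldl pvStepA (m, some k, cur)) =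
      m ++ (cur ++ PySem.List.pyRange j (j + ((seq.map pvKey).takeWhile (· == k)).length) 1)
        :: pvCanon (j + ((seq.map pvKey).takeWhile (· == k)).length) ((seq.map pvKey).dropWhile (· == k)) := by
  induction seq with
  | nil =>
      intro j m k cur hcur
      simp [PySem.List.enumerate_nil, pvFlush, hcur, pvCanon,
        PySem.List.pyRange_one_eq_nil (le_refl j)]
  | cons p rest ih =>
      intro j m k cur hcur
      rw [PySem.List.enumerate_cons, List.foldl_cons]
      by_cases hk : pvKey p = k
      · have h1 : pvStepA (m, some k, cur) (j, p) = (m, some k, cur ++ [j]) := by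
          simp [pvStepA, hk]
        rw [h1, ih (j + 1) m k (cur ++ [j]) (by simp)]
        have htw : ((p :: rest).map pvKey).takeWhile (· == k)
            = pvKey p :: ((rest.map pvKey).takeWhile (· == k)) := by
          simp [hk]
        have hdw : ((p :: rest).map pvKey).dropWhile (· == k)
            = (rest.map pvKey).dropWhile (· == k) := by
          simp [hk]
        rw [htw, hdw]
        set tw := ((rest.map pvKey).takeWhile (· == k)).length with htwdef
        have harith : j + ((pvKey p :: ((rest.map pvKey).takeWhile (· == k))).length : Int)
            = j + 1 + (tw : Int) := by
          simp [htwdef]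
          ring
        rw [harith]
        have hcons : PySem.List.pyRange j (j + 1 + (tw : Int)) 1
            = j :: PySem.List.pyRange (j + 1) (j + 1 + (tw : Int)) 1 := by
          apply PySem.List.pyRange_one_cons
          have : (0 : Int) ≤ (tw : Int) := Int.natCast_nonneg tw
          omega
        rw [hcons]
        simp
      · have h1 : pvStepA (m, some k, cur) (j, p) = (m ++ [cur], some (pvKey p), [j]) := by
          simp [pvStepA, hk]
        rw [h1, ih (j + 1) (m ++ [cur]) (pvKey p) [j] (by simp)]
        have htw : ((p :: rest).map pvKey).takeWhile (· == k) = [] := by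
          simp [hk]
        have hdw : ((p :: rest).map pvKey).dropWhile (· == k)
            = pvKey p :: rest.map pvKey := by
          simp [hk]
        rw [htw, hdw]
        simp only [List.length_nil, Nat.cast_zero, add_zero]
        rw [pvCanon]
        set tw := ((rest.map pvKey).takeWhile (· == pvKey p)).length with htwdef
        have hcons : PySem.List.pyRange j (j + 1 + (tw : Int)) 1
            = j :: PySem.List.pyRange (j + 1) (j + 1 + (tw : Int)) 1 := by
          apply PySem.List.pyRange_one_cons
          have : (0 : Int) ≤ (tw : Int) := Int.natCast_nonneg tw
          omega
        rw [hcons]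
        simp [PySem.List.pyRange_one_eq_nil (le_refl j)]

theorem pvA_eq_canon (seq : List (List (String × String))) :
    compressed_to_tool_indices seq = pvCanon 0 (seq.map pvKey) := by
  cases seq with
  | nil => simp [compressed_to_tool_indices, pvCanon]
  | cons x xs =>
      unfold compressed_to_tool_indices
      simp only [if_neg (List.cons_ne_nil x xs)]
      rw [PySem.List.enumerate_cons]
      show pvFlush _ = _
      rw [List.foldl_cons]
      have h1 : pvStepA ([], none, []) (0, x) = ([], some (pvKey x), [(0 : Int)]) := by
        simp [pvStepA]
      rw [h1, show (0:Int)+1 = 1 from by norm_num, pvFoldA_canon xs 1 [] (pvKey x) [0] (by simp)]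
      rw [List.map_cons, pvCanon]
      set tw := ((xs.map pvKey).takeWhile (· == pvKey x)).length with htwdef
      have hcons : PySem.List.pyRange 0 (0 + 1 + (tw : Int)) 1
          = 0 :: PySem.List.pyRange 1 (0 + 1 + (tw : Int)) 1 := by
        apply PySem.List.pyRange_one_cons
        have : (0 : Int) ≤ (tw : Int) := Int.natCast_nonneg tw
        omega
      rw [hcons]
      have harith : (1 : Int) + (tw : Int) = 0 + 1 + (tw : Int) := by ring
      rw [harith]
      simp

-- B's passes, named (syntactically identical to the port's let-bindings)
def pvStarts (keys : List String) : List Int :=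
  (PySem.List.pyRange 0 ((keys.length : Int)) 1).filter
    (fun i => i == 0 || !(PySem.List.pyGet? keys i == PySem.List.pyGet? keys (i - 1)))

def pvAssemble (starts : List Int) (n : Int) : List (List Int) :=
  (starts.zip (starts.drop 1 ++ [n])).map (fun p => PySem.List.pyRange p.1 p.2 1)

theorem pvB_eq_assemble (seq : List (List (String × String))) :
    compressed_to_tool_indices_alt seq
      = pvAssemble (pvStarts (seq.map pvKey)) (((seq.map pvKey).length : Int)) := rfl

-- change points after a fixed previous key
def pvRel (prev : String) (t : List String) : List Int :=
  (PySem.List.pyRange 0 ((t.length : Int)) 1).filter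
    (fun i => !(PySem.List.pyGet? t i == (if i == 0 then some prev else PySem.List.pyGet? t (i - 1))))

-- peeling the first index off a filtered range(0, m+1)
theorem pvFilterRange_succ (P : Int → Bool) (m : Nat) :
    (PySem.List.pyRange 0 ((m + 1 : Nat) : Int) 1).filter P
      = (if P 0 then [0] else [])
        ++ ((PySem.List.pyRange 0 ((m : Nat) : Int) 1).filter (fun j => P (j + 1))).map (· + 1) := by
  have h1 : PySem.List.pyRange 0 ((m + 1 : Nat) : Int) 1
      = 0 :: PySem.List.pyRange 1 ((m + 1 : Nat) : Int) 1 :=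
    PySem.List.pyRange_one_cons (by push_cast; omega)
  have h2 : PySem.List.pyRange 1 ((m + 1 : Nat) : Int) 1
      = (PySem.List.pyRange 0 ((m : Nat) : Int) 1).map (· + 1) := by
    have h := pvRange_shift 0 ((m : Nat) : Int) 1
    rw [show ((m + 1 : Nat) : Int) = ((m : Nat) : Int) + 1 from by push_cast; ring,
        show (1 : Int) = 0 + 1 from by ring]
    exact h
  rw [h1, h2, List.filter_cons, List.filter_map]
  simp only [Function.comp_def]
  by_cases h : P 0 = true <;> simp [h]

theorem pvGet_cons_succ' {α : Type} (x : α) (t : List α) (j : Int) (h : 0 ≤ j) :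
    PySem.List.pyGet? (x :: t) (j + 1) = PySem.List.pyGet? t j := by
  obtain ⟨n, rfl⟩ := Int.eq_ofNat_of_zero_le h
  exact PySem.List.pyGet?_cons_succ x t n

theorem pvGet_cons_if {α : Type} (x : α) (t : List α) (j : Int) (h : 0 ≤ j) :
    PySem.List.pyGet? (x :: t) j
      = if j == 0 then some x else PySem.List.pyGet? t (j - 1) := by
  obtain ⟨n, rfl⟩ := Int.eq_ofNat_of_zero_le h
  cases n with
  | zero => simp
  | succ i =>
      have h1 : ((i + 1 : Nat) : Int) = (i : Int) + 1 := by push_cast; ring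
      rw [h1, pvGet_cons_succ' x t (i : Int) (Int.natCast_nonneg i)]
      have h2 : (((i : Int) + 1) == 0) = false := by
        simp
        omega
      rw [h2]
      simp

theorem pvStarts_cons (k : String) (t : List String) :
    pvStarts (k :: t) = 0 :: (pvRel k t).map (· + 1) := by
  unfold pvStarts pvRel
  rw [show (((k :: t).length : Nat) : Int) = (((t.length + 1 : Nat) : Nat) : Int) from by simp]
  rw [pvFilterRange_succ]
  have hP0 : (((0 : Int) == 0) || !(PySem.List.pyGet? (k :: t) 0 == PySem.List.pyGet? (k :: t) (0 - 1))) = true := by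
    simp
  rw [if_pos hP0]
  simp only [List.singleton_append]
  congr 2
  refine List.filter_congr ?_
  intro j hj
  have h0j : 0 ≤ j := (PySem.List.mem_pyRange_one.mp hj).1
  have hne : ((j + 1) == (0 : Int)) = false := by simp; omega
  rw [hne]
  simp only [Bool.false_or]
  rw [show j + 1 - 1 = j from by ring]
  rw [pvGet_cons_succ' k t j h0j, pvGet_cons_if k t j h0j]

theorem pvRel_cons (prev x : String) (t : List String) :
    pvRel prev (x :: t) = (if x == prev then [] else [0]) ++ (pvRel x t).map (· + 1) := by
  unfold pvRel
  rw [show (((x :: t).length : Nat) : Int) = (((t.length + 1 : Nat) : Nat) : Int) from by simp]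
  rw [pvFilterRange_succ]
  have hP0 : (!(PySem.List.pyGet? (x :: t) 0 == (if (0 : Int) == 0 then some prev else PySem.List.pyGet? (x :: t) (0 - 1))))
      = !(x == prev) := by
    simp
  rw [hP0]
  have hif : (if (!(x == prev)) = true then ([0] : List Int) else [])
      = (if x == prev then [] else [0]) := by
    by_cases h : x == prev <;> simp [h]
  rw [hif]
  congr 2
  refine List.filter_congr ?_
  intro j hj
  have h0j : 0 ≤ j := (PySem.List.mem_pyRange_one.mp hj).1
  have hne : ((j + 1) == (0 : Int)) = false := by simp; omega
  rw [hne]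
  simp only [Bool.false_eq_true, if_false]
  rw [show j + 1 - 1 = j from by ring]
  rw [pvGet_cons_succ' x t j h0j, pvGet_cons_if x t j h0j]

theorem pvRel_replicate (k : String) (r : Nat) (rest : List String) :
    pvRel k (List.replicate r k ++ rest) = (pvRel k rest).map (· + (r : Int)) := by
  induction r with
  | zero => simp
  | succ i ih =>
      rw [List.replicate_succ, List.cons_append, pvRel_cons, ih]
      simp only [beq_self_eq_true, if_pos, List.nil_append, List.map_map]
      refine List.map_congr_left ?_
      intro a _
      simp [Function.comp]
      ring

theorem pvAssemble_shift (ss : List Int) (c n : Int) :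
    pvAssemble (ss.map (· + c)) (n + c) = (pvAssemble ss n).map (List.map (· + c)) := by
  unfold pvAssemble
  have hd : (ss.map (· + c)).drop 1 ++ [n + c] = ((ss.drop 1) ++ [n]).map (· + c) := by
    rw [List.map_append, List.map_drop]
    simp
  rw [hd, List.zip_map, List.map_map, List.map_map]
  refine List.map_congr_left ?_
  intro p _
  simp only [Function.comp_def, Prod.map]
  exact pvRange_shift p.1 p.2 c

theorem pvCanon_shift_aux (b : Int) : ∀ (N : Nat) (l : List String), l.length ≤ N → ∀ a,
    pvCanon (a + b) l = (pvCanon a l).map (List.map (· + b)) := by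
  intro N
  induction N with
  | zero =>
      intro l hl a
      have hnil : l = [] := List.length_eq_zero_iff.mp (Nat.le_zero.mp hl)
      subst hnil
      simp [pvCanon]
  | succ n ih =>
      intro l hl a
      cases l with
      | nil => simp [pvCanon]
      | cons k t =>
          rw [pvCanon, pvCanon]
          simp only [List.map_cons]
          congr 1
          · rw [show a + b + 1 + ((t.takeWhile (· == k)).length : Int)
                = (a + 1 + ((t.takeWhile (· == k)).length : Int)) + b from by ring,
              pvRange_shift]
          · rw [show a + b + 1 + ((t.takeWhile (· == k)).length : Int)
                = (a + 1 + ((t.takeWhile (· == k)).length : Int)) + b from by ring]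
            exact ih (t.dropWhile (· == k))
              (le_trans (List.length_dropWhile_le _ _) (by simpa using hl))
              (a + 1 + ((t.takeWhile (· == k)).length : Int))

theorem pvCanon_shift (b : Int) : ∀ (l : List String) (a : Int),
    pvCanon (a + b) l = (pvCanon a l).map (List.map (· + b)) := by
  intro l a
  exact pvCanon_shift_aux b l.length l le_rfl a

theorem pvDropWhile_head_false {α : Type} (p : α → Bool) :
    ∀ (t : List α) (y : α) (r2 : List α), t.dropWhile p = y :: r2 → p y = false := by
  intro t
  induction t with
  | nil => intro y r2 h; simp at h
  | cons a t ih =>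
      intro y r2 h
      rw [List.dropWhile_cons] at h
      by_cases hp : p a = true
      · rw [if_pos hp] at h
        exact ih y r2 h
      · rw [if_neg hp] at h
        injection h with h1 h2
        subst h1
        simpa using hp

theorem pvAssemble_cons₂ (a b : Int) (l : List Int) (n : Int) :
    pvAssemble (a :: b :: l) n = PySem.List.pyRange a b 1 :: pvAssemble (b :: l) n := by
  simp [pvAssemble]

theorem pvB_eq_canon_aux : ∀ (N : Nat) (keys : List String), keys.length ≤ N →
    pvAssemble (pvStarts keys) ((keys.length : Int)) = pvCanon 0 keys := by
  intro N
  induction N with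
  | zero =>
      intro keys h
      have hnil : keys = [] := List.length_eq_zero_iff.mp (Nat.le_zero.mp h)
      subst hnil
      simp [pvStarts, pvAssemble, pvCanon]
  | succ N ih =>
      intro keys h
      cases keys with
      | nil => simp [pvStarts, pvAssemble, pvCanon]
      | cons k t =>
          have htake : t.takeWhile (· == k) = List.replicate ((t.takeWhile (· == k)).length) k := by
            refine List.eq_replicate_iff.mpr ⟨rfl, ?_⟩
            intro b hb
            have := List.mem_takeWhile_imp hb
            simpa using this
          have ht : t = List.replicate ((t.takeWhile (· == k)).length) k ++ t.dropWhile (· == k) := by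
            conv_lhs => rw [← List.takeWhile_append_dropWhile (p := (· == k)) (l := t)]
            rw [← htake]
          rw [pvStarts_cons]
          cases hrest : t.dropWhile (· == k) with
          | nil =>
              have hrel : pvRel k t = [] := by
                conv_lhs => rw [ht, hrest]
                rw [pvRel_replicate]
                simp [pvRel, PySem.List.pyRange_one_eq_nil (le_refl (0 : Int))]
              rw [hrel]
              have hlen : t.length = (t.takeWhile (· == k)).length := by
                conv_lhs => rw [ht, hrest]
                simp
              rw [pvCanon, hrest]
              simp only [pvCanon, List.map_nil, pvAssemble, List.drop_nil,
                List.nil_append, List.zip_cons_cons, List.zip_nil_right, List.map_cons,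
                List.drop_succ_cons]
              rw [show (((k :: t).length : Nat) : Int)
                  = 0 + 1 + ((t.takeWhile (· == k)).length : Int) from by
                simp [hlen]; ring]
          | cons y r2 =>
              have hr2len : t.length = (t.takeWhile (· == k)).length + (y :: r2).length := by
                conv_lhs => rw [ht, hrest]
                simp
              have hy : (y == k) = false := pvDropWhile_head_false (· == k) t y r2 hrest
              have hrel : pvRel k t
                  = (0 :: (pvRel y r2).map (· + 1)).map (· + ((t.takeWhile (· == k)).length : Int)) := by
                conv_lhs => rw [ht, hrest]
                rw [pvRel_replicate, pvRel_cons, hy]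
                simp
              rw [hrel]
              set r : Int := ((t.takeWhile (· == k)).length : Int) with hrdef
              set T : List Int := (pvRel y r2).map (· + 1) with hT
              have hmm : (((0 : Int) :: T).map (· + r)).map (· + 1)
                  = (r + 1) :: T.map (· + (r + 1)) := by
                simp only [List.map_cons, List.map_map, Function.comp_def, zero_add]
                congr 1
                refine List.map_congr_left ?_
                intro x _
                ring
              rw [hmm]
              have hmm2 : ((r + 1) :: T.map (· + (r + 1)))
                  = ((0 : Int) :: T).map (· + (r + 1)) := by
                simp
              rw [pvAssemble_cons₂, hmm2]
              have hn : (((k :: t).length : Nat) : Int) = (((y :: r2).length : Nat) : Int) + (r + 1) := by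
                simp [hr2len]
                ring
              rw [hn, pvAssemble_shift]
              have hS : ((0 : Int) :: T) = pvStarts (y :: r2) := (pvStarts_cons y r2).symm
              rw [hS, ih (y :: r2) (by
                have h1 : (y :: r2).length ≤ t.length := by omega
                have h2 : t.length ≤ N := by simpa using h
                omega)]
              conv_rhs => rw [pvCanon, hrest]
              rw [show (0 : Int) + 1 + r = 0 + (r + 1) from by ring]
              rw [pvCanon_shift (r + 1) (y :: r2) 0]
              rw [show (0 : Int) + (r + 1) = r + 1 from by ring]

theorem pvB_eq_canon (keys : List String) :
    pvAssemble (pvStarts keys) ((keys.length : Int)) = pvCanon 0 keys :=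
  pvB_eq_canon_aux keys.length keys le_rfl

-- ===== VERDICT (by name: the statement is the Claim_ definition above) =====
theorem compressed_to_tool_indices_spec : Claim_equal_compressed_to_tool_indices := by
  intro seq _ _
  unfold Spec_compressed_to_tool_indices
  rw [pvA_eq_canon, pvB_eq_assemble, pvB_eq_canon]
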